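-- pv_equiv track=rewrite | github.com/newkimjiwon/CodingTest | BAEKJOON/S4/14469번_소가 길을 건너간 이유 3.py | solution
-- ===== SOURCE A (Python) =====
-- def solution(n, arr):
--     # 1. 도착 시간 기준으로 정렬
--     arr.sort()
--
--     # 2. 현재 시간 초기화
--     current_time = 0
--
--     # 3. 각 소 처리
--     for arrival, duration in arr:
--         if current_time < arrival:
--             current_time = arrival
--         current_time += duration
--
--     return current_time
-- ===== SOURCE B (Python) =====
-- def solution(n, arr):
--     # Sort in place (same observable mutation as the original).
--     arr.sort()
--     # Finishing time = max over start points j of (arrival_j + sum of durations from j on),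
--     # with the baseline "start immediately at time 0" = total duration.
--     suffix = sum(d for _, d in arr)
--     best = suffix
--     for arrival, duration in arr:
--         best = max(best, arrival + suffix)
--         suffix -= duration
--     return best
-- ===== Notes on version B (the rewrite author's own statement) =====
-- stated objective: alternative
-- what changed: Replaces the running-clock greedy accumulator with a suffix-sum formulation: the answer is the maximum over cows of arrival + suffix sum of durations, baselined by the total duration.
import Mathlib
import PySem

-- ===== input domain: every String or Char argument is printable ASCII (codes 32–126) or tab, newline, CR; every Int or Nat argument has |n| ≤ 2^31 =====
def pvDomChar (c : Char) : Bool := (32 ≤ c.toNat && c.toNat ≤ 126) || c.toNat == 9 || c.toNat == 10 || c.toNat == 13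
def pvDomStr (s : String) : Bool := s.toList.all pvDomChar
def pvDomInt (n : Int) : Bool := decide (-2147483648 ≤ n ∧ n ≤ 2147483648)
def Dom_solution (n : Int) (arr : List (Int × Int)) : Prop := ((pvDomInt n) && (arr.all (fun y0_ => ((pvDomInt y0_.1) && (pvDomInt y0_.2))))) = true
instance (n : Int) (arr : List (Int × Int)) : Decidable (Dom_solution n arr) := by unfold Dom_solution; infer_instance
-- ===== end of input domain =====

-- B replaces A's running-clock greedy with a suffix-sum/max formulation (same cost); both sort arr in place, equivalence is about the return value.


-- ===== PORT A =====
def solution (n : Int) (arr : List (Int × Int)) : Int :=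
  -- arr.sort() : Python sorts tuples lexicographically
  let sorted := PySem.List.sorted2 arr (fun p => p.1) (fun p => p.2)
  sorted.foldl (fun current_time p =>
    (if current_time < p.1 then p.1 else current_time) + p.2) 0

-- ===== PORT B =====
def solution_alt (n : Int) (arr : List (Int × Int)) : Int :=
  let sorted := PySem.List.sorted2 arr (fun p => p.1) (fun p => p.2)
  let total := sorted.foldl (fun s p => s + p.2) 0
  (sorted.foldl (fun (st : Int × Int) p => (max st.1 (p.1 + st.2), st.2 - p.2))
    (total, total)).1

-- ===== PRECONDITION & SPEC =====
def Spec_solution (n : Int) (arr : List (Int × Int)) (out : Int) : Prop := out = solution_alt n arr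
instance (n : Int) (arr : List (Int × Int)) (out : Int) : Decidable (Spec_solution n arr out) := by unfold Spec_solution; infer_instance

-- ===== CLAIM (what is proved, stated in full; the proofs are below) =====
def Claim_equal_solution : Prop := ∀ (n : Int) (arr : List (Int × Int)), Dom_solution n arr → Spec_solution n arr (solution n arr)

-- ===== LEMMAS AND PROOFS =====

def pvSumDur (xs : List (Int × Int)) : Int := xs.foldl (fun s p => s + p.2) 0

theorem pvSumDur_foldl (xs : List (Int × Int)) : ∀ a : Int,
    xs.foldl (fun s p => s + p.2) a = a + pvSumDur xs := by
  induction xs with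
  | nil => intro a; simp [pvSumDur]
  | cons h t ih =>
      intro a
      simp only [List.foldl_cons, pvSumDur] at *
      rw [ih (a + h.2), ih (0 + h.2)]
      ring

theorem pv_main (xs : List (Int × Int)) : ∀ c : Int,
    xs.foldl (fun current_time p =>
      (if current_time < p.1 then p.1 else current_time) + p.2) c
    = (xs.foldl (fun (st : Int × Int) p => (max st.1 (p.1 + st.2), st.2 - p.2))
        (c + pvSumDur xs, pvSumDur xs)).1 := by
  induction xs with
  | nil => intro c; simp [pvSumDur]
  | cons h t ih =>
      intro c
      have hs : pvSumDur (h :: t) = h.2 + pvSumDur t := by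
        simp only [pvSumDur, List.foldl_cons]
        rw [pvSumDur_foldl]
        simp [pvSumDur]
      simp only [List.foldl_cons]
      rw [ih ((if c < h.1 then h.1 else c) + h.2)]
      have h1 : (if c < h.1 then h.1 else c) + h.2 + pvSumDur t
          = max (c + pvSumDur (h :: t)) (h.1 + pvSumDur (h :: t)) := by
        rw [hs]; rcases lt_or_ge c h.1 with hlt | hge
        · rw [if_pos hlt]; omega
        · rw [if_neg (not_lt.mpr hge)]; omega
      have h2 : pvSumDur t = pvSumDur (h :: t) - h.2 := by omega
      rw [h1, h2]

-- ===== VERDICT (by name: the statement is the Claim_ definition above) =====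
theorem solution_spec : Claim_equal_solution := by
  intro n arr _
  unfold Spec_solution solution solution_alt
  simp only []
  rw [pv_main, pvSumDur]
  simp
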